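-- pv_equiv track=rewrite | github.com/ASISaga/kb-mcp-server | src/kb_builder/markdown_loader.py | segment_markdown_document
-- ===== SOURCE A (Python) =====
-- from typing import List, Dict, Any, Optional
--
-- def segment_markdown_document(
--     text: str,
--     by_headings: bool = True,
--     min_segment_length: int = 100
-- ) -> List[str]:
--     """
--     Segment a markdown document into smaller chunks.
--
--     Args:
--         text: Markdown text content
--         by_headings: Whether to segment by heading boundaries
--         min_segment_length: Minimum length for a segment (in characters)
--
--     Returns:
--         List of text segments
--     """
--     if not by_headings:
--         # Simple paragraph-based segmentation
--         paragraphs = [p.strip() for p in text.split('\n\n') if p.strip()]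
--         return [p for p in paragraphs if len(p) >= min_segment_length]
--
--     # Segment by headings
--     segments = []
--     current_segment = []
--     current_heading = None
--
--     for line in text.split('\n'):
--         # Check if line is a heading
--         if line.strip().startswith('#'):
--             # Save previous segment if it exists
--             if current_segment:
--                 segment_text = '\n'.join(current_segment).strip()
--                 if len(segment_text) >= min_segment_length:
--                     segments.append(segment_text)
--
--             # Start new segment with heading
--             current_heading = line
--             current_segment = [line]
--         else:
--             current_segment.append(line)
--
--     # Add final segment
--     if current_segment:
--         segment_text = '\n'.join(current_segment).strip()
--         if len(segment_text) >= min_segment_length: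
--             segments.append(segment_text)
--
--     return segments if segments else [text]
-- ===== SOURCE B (Python) =====
-- def segment_markdown_document(
--     text: str,
--     by_headings: bool = True,
--     min_segment_length: int = 100
-- ):
--     if not by_headings:
--         segs = []
--         for q in text.split('\n\n'):
--             p = q.strip()
--             if p and len(p) >= min_segment_length:
--                 segs.append(p)
--         return segs
--
--     # Two-pointer grouping: slice the line list into maximal groups, each
--     # starting at a heading line (or at line 0), then emit in one pass.
--     lines = text.split('\n')
--     n = len(lines)
--     groups = []
--     i = 0
--     while i < n:
--         j = i + 1
--         while j < n and not lines[j].strip().startswith('#'):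
--             j += 1
--         groups.append(lines[i:j])
--         i = j
--
--     segments = []
--     for g in groups:
--         s = '\n'.join(g).strip()
--         if len(s) >= min_segment_length:
--             segments.append(s)
--     return segments if segments else [text]
-- ===== Notes on version B (the rewrite author's own statement) =====
-- stated objective: alternative
-- what changed: Replaces A's stateful accumulator loop (current_segment carried line by line with emit-on-heading and a final flush) by a two-pointer pass that slices the line list into maximal heading-delimited groups and then emits/filters all groups in one separate pass.
import Mathlib
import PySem

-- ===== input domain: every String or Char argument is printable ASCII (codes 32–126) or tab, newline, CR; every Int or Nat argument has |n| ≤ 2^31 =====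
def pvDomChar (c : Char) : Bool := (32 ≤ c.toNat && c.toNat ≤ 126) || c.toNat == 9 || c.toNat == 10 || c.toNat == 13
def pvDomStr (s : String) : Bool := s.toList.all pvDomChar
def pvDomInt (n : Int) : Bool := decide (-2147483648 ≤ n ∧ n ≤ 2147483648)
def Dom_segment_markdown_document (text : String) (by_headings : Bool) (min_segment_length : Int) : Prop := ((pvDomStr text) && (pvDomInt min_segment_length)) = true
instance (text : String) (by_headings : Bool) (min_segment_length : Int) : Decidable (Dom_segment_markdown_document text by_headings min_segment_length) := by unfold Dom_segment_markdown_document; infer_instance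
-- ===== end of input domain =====

-- B replaces A's accumulator loop (current_segment carried across lines) by a two-pointer
-- slicing of the line list into maximal heading-delimited groups, emitted in one final pass;
-- objective: alternative decomposition, same cost.

-- ===== PORT A =====
-- shared helper: line.strip().startswith('#')
def pvIsHeading (ln : String) : Bool := PySem.Str.startswith (PySem.Str.strip ln) "#"

-- shared helper: the emit step 'segment_text = "\n".join(cur).strip(); if len >= min: append'
def pvEmit (m : Int) (segs : List String) (cur : List String) : List String :=
  let s := PySem.Str.strip (PySem.Str.join "\n" cur)
  if m ≤ PySem.Str.len s then segs ++ [s] else segs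

def segment_markdown_document (text : String) (by_headings : Bool) (min_segment_length : Int) : List String :=
  if !by_headings then
    let paragraphs := ((PySem.Str.split? text "\n\n").getD []).map PySem.Str.strip |>.filter (fun p => p != "")
    paragraphs.filter (fun p => decide (min_segment_length ≤ PySem.Str.len p))
  else
    let lines := (PySem.Str.split? text "\n").getD []
    let st := lines.foldl (fun st line =>
      if pvIsHeading line then
        ((if st.2.isEmpty then st.1 else pvEmit min_segment_length st.1 st.2), [line])
      else
        (st.1, st.2 ++ [line])) (([], []) : List String × List String)
    let segments := if st.2.isEmpty then st.1 else pvEmit min_segment_length st.1 st.2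
    if segments.isEmpty then [text] else segments

-- ===== PORT B =====
-- inner while loop: longest prefix of non-heading lines, and the remainder
def altSpan : List String → List String × List String
  | [] => ([], [])
  | l :: t => if pvIsHeading l then ([], l :: t) else
      let p := altSpan t
      (l :: p.1, p.2)

theorem altSpan_snd_length_le (t : List String) : (altSpan t).2.length ≤ t.length := by
  induction t with
  | nil => simp [altSpan]
  | cons l t ih =>
    simp only [altSpan]
    split
    · simp
    · simpa using Nat.le_succ_of_le ih

-- outer while loop: slice the line list into maximal groups lines[i:j]
def altGroups : List String → List (List String)
  | [] => []
  | l :: rest =>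
      (l :: (altSpan rest).1) :: altGroups (altSpan rest).2
termination_by ls => ls.length
decreasing_by
  have := altSpan_snd_length_le rest
  simp; omega

def segment_markdown_document_alt (text : String) (by_headings : Bool) (min_segment_length : Int) : List String :=
  if !by_headings then
    ((PySem.Str.split? text "\n\n").getD []).foldl (fun segs q =>
      let p := PySem.Str.strip q
      if p ≠ "" ∧ min_segment_length ≤ PySem.Str.len p then segs ++ [p] else segs) []
  else
    let lines := (PySem.Str.split? text "\n").getD []
    let segments := (altGroups lines).foldl (pvEmit min_segment_length) []
    if segments.isEmpty then [text] else segments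

-- ===== PRECONDITION & SPEC =====
def Spec_segment_markdown_document (text : String) (by_headings : Bool) (min_segment_length : Int) (out : List String) : Prop := out = segment_markdown_document_alt text by_headings min_segment_length
instance (text : String) (by_headings : Bool) (min_segment_length : Int) (out : List String) : Decidable (Spec_segment_markdown_document text by_headings min_segment_length out) := by unfold Spec_segment_markdown_document; infer_instance

-- ===== CLAIM (what is proved, stated in full; the proofs are below) =====
def Claim_equal_segment_markdown_document : Prop := ∀ (text : String) (by_headings : Bool) (min_segment_length : Int), Dom_segment_markdown_document text by_headings min_segment_length → Spec_segment_markdown_document text by_headings min_segment_length (segment_markdown_document text by_headings min_segment_length)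

-- ===== LEMMAS AND PROOFS =====

theorem pvEmit_shift (m : Int) (segs cur : List String) :
    pvEmit m segs cur = segs ++ pvEmit m [] cur := by
  simp only [pvEmit]
  by_cases h : m ≤ PySem.Str.len (PySem.Str.strip (PySem.Str.join "\n" cur))
  · rw [if_pos h, if_pos h]; simp
  · rw [if_neg h, if_neg h]; simp

theorem foldl_pvEmit_shift (m : Int) (gs : List (List String)) (acc : List String) :
    gs.foldl (pvEmit m) acc = acc ++ gs.foldl (pvEmit m) [] := by
  induction gs generalizing acc with
  | nil => simp
  | cons g gs ih =>
    simp only [List.foldl_cons]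
    rw [ih (pvEmit m acc g), ih (pvEmit m [] g), pvEmit_shift]
    simp

-- the segment stream A's loop produces from state `cur` on the remaining lines (incl. final flush)
def pvF (m : Int) (cur : List String) : List String → List String
  | [] => if cur.isEmpty then [] else pvEmit m [] cur
  | l :: t =>
      if pvIsHeading l then
        (if cur.isEmpty then [] else pvEmit m [] cur) ++ pvF m [l] t
      else
        pvF m (cur ++ [l]) t

theorem foldA_eq_pvF (m : Int) (lines : List String) (segs cur : List String) :
    (let st := lines.foldl (fun st line =>
        if pvIsHeading line then
          ((if st.2.isEmpty then st.1 else pvEmit m st.1 st.2), [line])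
        else
          (st.1, st.2 ++ [line])) (segs, cur)
     if st.2.isEmpty then st.1 else pvEmit m st.1 st.2)
    = segs ++ pvF m cur lines := by
  induction lines generalizing segs cur with
  | nil =>
    simp only [List.foldl_nil, pvF]
    by_cases hc : cur.isEmpty = true
    · simp [hc]
    · rw [if_neg hc, if_neg hc]
      exact pvEmit_shift m segs cur
  | cons l t ih =>
    simp only [List.foldl_cons, pvF]
    by_cases h : pvIsHeading l = true
    · rw [if_pos h, if_pos h, ih]
      by_cases hc : cur.isEmpty = true
      · simp [hc]
      · rw [if_neg hc, if_neg hc, pvEmit_shift, List.append_assoc]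
    · rw [if_neg h, if_neg h, ih]

theorem pvF_eq_groups (m : Int) (t : List String) (g : List String) (hg : g ≠ []) :
    pvF m g t = pvEmit m [] (g ++ (altSpan t).1)
      ++ (altGroups (altSpan t).2).foldl (pvEmit m) [] := by
  induction t generalizing g with
  | nil => simp [pvF, altSpan, altGroups, hg]
  | cons l t ih =>
    by_cases h : pvIsHeading l = true
    · simp only [pvF, h, if_pos, altSpan]
      rw [ih [l] (by simp)]
      simp only [altGroups, List.foldl_cons]
      rw [foldl_pvEmit_shift m _ (pvEmit m [] (l :: (altSpan t).1))]
      simp [hg]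
    · simp only [pvF, h, altSpan]
      rw [ih (g ++ [l]) (by simp)]
      simp

theorem pvF_nil_eq (m : Int) (lines : List String) :
    pvF m [] lines = (altGroups lines).foldl (pvEmit m) [] := by
  cases lines with
  | nil => simp [pvF, altGroups]
  | cons l t =>
    have : pvF m [] (l :: t) = pvF m [l] t := by
      simp only [pvF]
      split <;> simp
    rw [this, pvF_eq_groups m t [l] (by simp)]
    simp only [altGroups, List.foldl_cons]
    rw [foldl_pvEmit_shift m _ (pvEmit m [] (l :: (altSpan t).1))]
    simp

theorem branch_false_eq (m : Int) (xs : List String) (acc : List String) :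
    xs.foldl (fun segs q =>
        let p := PySem.Str.strip q
        if p ≠ "" ∧ m ≤ PySem.Str.len p then segs ++ [p] else segs) acc
    = acc ++ ((xs.map PySem.Str.strip |>.filter (fun p => p != "")).filter
              (fun p => decide (m ≤ PySem.Str.len p))) := by
  induction xs generalizing acc with
  | nil => simp
  | cons x xs ih =>
    rw [List.foldl_cons, ih]
    simp only [List.map_cons, List.filter_cons]
    by_cases h1 : PySem.Str.strip x = ""
    · simp [h1]
    · have hb : (PySem.Str.strip x).length = (PySem.Chars.strip x.toList).length := by
        simp [← PySem.Str.toList_strip]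
      by_cases h2 : m ≤ ((PySem.Str.strip x).length : Int)
      · have h2' : m ≤ ((PySem.Chars.strip x.toList).length : Int) := by omega
        simp [h1, h2, h2']
      · have h2' : ¬ m ≤ ((PySem.Chars.strip x.toList).length : Int) := by omega
        simp [h1, h2, h2']

-- ===== VERDICT (by name: the statement is the Claim_ definition above) =====
theorem segment_markdown_document_spec : Claim_equal_segment_markdown_document := by
  intro text by_headings m _
  unfold Spec_segment_markdown_document segment_markdown_document segment_markdown_document_alt
  cases by_headings with
  | false =>
    simp only [Bool.not_false, if_pos]
    rw [branch_false_eq]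
    simp
  | true =>
    simp only [Bool.not_true]
    rw [foldA_eq_pvF, pvF_nil_eq]
    simp
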